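-- pv_equiv track=rewrite | github.com/Leapense/problems | 17889번: Mars Window/Mars Window.py | is_optimal_launch_year
-- ===== SOURCE A (Python) =====
-- def is_optimal_launch_year(year):
--     # April 2018 in months since the year 0
--     april_2018 = 2018 * 12 + 4
--
--     # Convert the given year to the range in months
--     start_month = year * 12 + 1
--     end_month = year * 12 + 12
--
--     # Check each 26-month interval starting from April 2018
--     current_window_start = april_2018
--     while current_window_start <= end_month:
--         current_window_end = current_window_start + 25
--         if current_window_start <= end_month and current_window_start >= start_month:
--             return "yes"
--         current_window_start += 26
--
--     return "no"
-- ===== SOURCE B (Python) =====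
-- def is_optimal_launch_year(year):
--     APRIL_2018 = 2018 * 12 + 4
--     start_month = year * 12 + 1
--     end_month = year * 12 + 12
--     # first window start >= start_month (windows at APRIL_2018 + 26*k, k >= 0)
--     k = max(0, -((APRIL_2018 - start_month) // 26))
--     first = APRIL_2018 + 26 * k
--     return "yes" if first <= end_month else "no"
-- ===== Notes on version B (the rewrite author's own statement) =====
-- stated objective: faster
-- what changed: Replaced A's while-loop that steps window start by window start from April of the reference year until passing the queried year with constant-time modular arithmetic: a ceiling division computes the first window start at or after the year's first month, then one comparison against the year's last month decides.
import Mathlib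
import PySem

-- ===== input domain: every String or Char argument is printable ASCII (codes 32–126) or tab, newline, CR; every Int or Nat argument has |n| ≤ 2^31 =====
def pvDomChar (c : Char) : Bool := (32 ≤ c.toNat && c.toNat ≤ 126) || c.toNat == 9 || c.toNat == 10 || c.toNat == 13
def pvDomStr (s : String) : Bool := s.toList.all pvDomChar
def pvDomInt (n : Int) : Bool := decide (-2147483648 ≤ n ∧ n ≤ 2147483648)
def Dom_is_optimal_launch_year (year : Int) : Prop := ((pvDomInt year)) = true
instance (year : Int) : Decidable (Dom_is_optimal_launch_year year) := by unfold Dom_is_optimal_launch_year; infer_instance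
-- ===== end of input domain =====

-- B replaces A's window-stepping loop by constant-time modular arithmetic (ceiling division to the first window start at or after the year's first month).

-- ===== PORT A =====
-- A's while-loop: step current_window_start by the window length while it is ≤ end_month.
def pvLoopA (startM endM cur : Int) : String :=
  if cur ≤ endM then
    if cur ≤ endM ∧ cur ≥ startM then "yes"
    else pvLoopA startM endM (cur + 26)
  else "no"
termination_by (endM + 1 - cur).toNat
decreasing_by omega

def is_optimal_launch_year (year : Int) : String :=
  let april_2018 : Int := 2018 * 12 + 4
  let start_month := year * 12 + 1
  let end_month := year * 12 + 12
  pvLoopA start_month end_month april_2018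

-- ===== PORT B =====
def is_optimal_launch_year_alt (year : Int) : String :=
  let april_2018 : Int := 2018 * 12 + 4
  let start_month := year * 12 + 1
  let end_month := year * 12 + 12
  let k := max 0 (-(PySem.Int.floordiv (april_2018 - start_month) 26))
  let first := april_2018 + 26 * k
  if first ≤ end_month then "yes" else "no"

-- ===== PRECONDITION & SPEC =====
def Spec_is_optimal_launch_year (year : Int) (out : String) : Prop := out = is_optimal_launch_year_alt year
instance (year : Int) (out : String) : Decidable (Spec_is_optimal_launch_year year out) := by unfold Spec_is_optimal_launch_year; infer_instance

-- ===== CLAIM (what is proved, stated in full; the proofs are below) =====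
def Claim_equal_is_optimal_launch_year : Prop := ∀ (year : Int), Dom_is_optimal_launch_year year → Spec_is_optimal_launch_year year (is_optimal_launch_year year)

-- ===== LEMMAS AND PROOFS =====

-- once the cursor has reached startM, the loop decides on the spot
theorem pvLoopA_ge (startM endM cur : Int) (h : startM ≤ cur) :
    pvLoopA startM endM cur = if cur ≤ endM then "yes" else "no" := by
  rw [pvLoopA]
  split
  · simp_all
  · rfl

-- while the cursor is below startM (and still ≤ endM) the loop just steps
theorem pvLoopA_step (startM endM cur : Int) (h1 : cur < startM) (h2 : cur ≤ endM) :
    pvLoopA startM endM cur = pvLoopA startM endM (cur + 26) := by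
  rw [pvLoopA, if_pos h2, if_neg (show ¬ (cur ≤ endM ∧ cur ≥ startM) by omega)]

-- the loop skips n steps as long as every intermediate cursor is below startM
theorem pvLoopA_climb (startM endM : Int) (hse : startM ≤ endM) :
    ∀ (n : Nat) (cur : Int), (∀ j : Nat, j < n → cur + 26 * j < startM) →
      pvLoopA startM endM cur = pvLoopA startM endM (cur + 26 * n) := by
  intro n
  induction n with
  | zero => intro cur _; simp
  | succ m ih =>
    intro cur hbelow
    have h0 : cur < startM := by have := hbelow 0 (Nat.succ_pos m); simpa using this
    have h1 : cur ≤ endM := by omega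
    rw [pvLoopA_step startM endM cur h0 h1, ih (cur + 26)]
    · congr 1; push_cast; ring
    · intro j hj
      have := hbelow (j + 1) (by omega)
      push_cast at this ⊢
      omega

theorem is_optimal_launch_year_eq_alt (year : Int) :
    is_optimal_launch_year year = is_optimal_launch_year_alt year := by
  show pvLoopA (year * 12 + 1) (year * 12 + 12) (2018 * 12 + 4) =
    (if (2018 * 12 + 4 : Int) + 26 * max 0 (-(PySem.Int.floordiv ((2018 * 12 + 4) - (year * 12 + 1)) 26)) ≤ year * 12 + 12 then "yes" else "no")
  set s := year * 12 + 1 with hs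
  set e := year * 12 + 12 with he
  have hse : s ≤ e := by omega
  set q := PySem.Int.floordiv ((2018 * 12 + 4 : Int) - s) 26 with hqdef
  have hdm := PySem.Int.floordiv_mul_add_mod ((2018 * 12 + 4 : Int) - s) 26
  have hr0 : 0 ≤ PySem.Int.mod ((2018 * 12 + 4 : Int) - s) 26 := PySem.Int.mod_nonneg _ (by norm_num)
  have hr1 : PySem.Int.mod ((2018 * 12 + 4 : Int) - s) 26 < 26 := PySem.Int.mod_lt _ (by norm_num)
  set r := PySem.Int.mod ((2018 * 12 + 4 : Int) - s) 26 with hrdef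
  by_cases hcase : s ≤ (2018 * 12 + 4 : Int)
  · -- start of the year is at or before April 2018: B's k is 0, A's loop decides at once
    have hq0 : 0 ≤ q := by nlinarith
    have hk : max 0 (-q) = 0 := by omega
    simp only [hk]
    rw [pvLoopA_ge _ _ _ hcase]
    norm_num
  · -- April 2018 is before the year: the loop climbs to s + r, B's first = s + r
    have hq0 : q < 0 := by nlinarith
    have hfirst : (2018 * 12 + 4 : Int) + 26 * max 0 (-q) = s + r := by
      have : max 0 (-q) = -q := by omega
      rw [this]; linarith
    have hn : ((-q).toNat : Int) = -q := by omega
    rw [pvLoopA_climb s e hse (-q).toNat (2018 * 12 + 4)]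
    · rw [hn]
      have h2 : (2018 * 12 + 4 : Int) + 26 * (-q) = s + r := by linarith
      rw [h2, pvLoopA_ge _ _ _ (by omega)]
      rw [hfirst]
    · intro j hj
      have hji : (j : Int) < -q := by omega
      have : (2018 * 12 + 4 : Int) + 26 * j ≤ (2018 * 12 + 4) + 26 * (-q - 1) := by
        have : (j : Int) ≤ -q - 1 := by omega
        linarith
      have h3 : (2018 * 12 + 4 : Int) + 26 * (-q - 1) = s + r - 26 := by linarith
      omega

-- ===== VERDICT (by name: the statement is the Claim_ definition above) =====
theorem is_optimal_launch_year_spec : Claim_equal_is_optimal_launch_year := by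
  intro year _
  unfold Spec_is_optimal_launch_year
  exact is_optimal_launch_year_eq_alt year
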